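-- pv_equiv track=rewrite | github.com/sourimmitramol/shipment_qna_bot | src/shipment_qna_bot/graph/nodes/static_greet_info_handler.py | _split_ceo_block
-- ===== SOURCE A (Python) =====
-- from typing import Any, Dict, Iterable, List, Optional
--
-- def _split_ceo_block(block: str) -> tuple[str, List[str], List[str]]:
--     lines = [l.strip() for l in block.splitlines() if l.strip()]
--     if not lines:
--         return "", [], []
--     if lines[0].startswith("**") and lines[0].endswith("**"):
--         lines = lines[1:]
--     if not lines:
--         return "", [], []
--
--     name = lines[0]
--     title_lines: List[str] = []
--     message_lines: List[str] = []
--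
--     for idx, line in enumerate(lines[1:], start=1):
--         if (
--             len(title_lines) < 2
--             and len(line) <= 80
--             and not line.endswith((".", "!", "?"))
--         ):
--             title_lines.append(line)
--             continue
--         message_lines = lines[idx:]
--         break
--
--     return name, title_lines, message_lines
-- ===== SOURCE B (Python) =====
-- def _split_ceo_block(block: str) -> tuple[str, list[str], list[str]]:
--     lines = [l.strip() for l in block.splitlines() if l.strip()]
--     if not lines:
--         return "", [], []
--     if lines[0].startswith("**") and lines[0].endswith("**"):
--         lines = lines[1:]
--         if not lines:
--             return "", [], []
--     name, rest = lines[0], lines[1:]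
--     # find the first DISQUALIFYING line (too long or sentence-like), default = end;
--     # the title block is the qualifying prefix clamped to at most two lines.
--     first_fail = next((i for i, l in enumerate(rest)
--                        if len(l) > 80 or l.endswith((".", "!", "?"))),
--                       len(rest))
--     k = min(2, first_fail)
--     return name, rest[:k], rest[k:]
-- ===== Notes on version B (the rewrite author's own statement) =====
-- stated objective: alternative
-- what changed: Instead of A's accumulate-titles-then-break loop, B searches for the index of the first disqualifying line (lazy generator with a length default), clamps it to 2 with min, and produces titles/message as two slices at that cut point; correctness rests on the clamp identity min(2, first_fail) = number of titles A accumulates.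
import Mathlib
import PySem

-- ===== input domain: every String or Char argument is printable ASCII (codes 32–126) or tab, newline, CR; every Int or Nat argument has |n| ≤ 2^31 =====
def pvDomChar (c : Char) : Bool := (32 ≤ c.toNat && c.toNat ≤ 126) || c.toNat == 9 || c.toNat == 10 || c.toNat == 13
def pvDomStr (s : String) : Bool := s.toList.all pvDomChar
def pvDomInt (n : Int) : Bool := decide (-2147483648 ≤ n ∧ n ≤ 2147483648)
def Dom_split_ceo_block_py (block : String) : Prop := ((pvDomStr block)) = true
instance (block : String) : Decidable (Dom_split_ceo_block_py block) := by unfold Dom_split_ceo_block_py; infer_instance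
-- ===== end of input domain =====

-- B replaces A's accumulate-and-break loop by a search for the first disqualifying line,
-- clamped to 2, then two slices at that cut (objective: alternative).

-- ===== PORT A =====
-- A's for-loop over enumerate(lines[1:], start=1): state = title_lines; on break returns
-- (title_lines, lines[idx:]), on normal exhaustion (title_lines, []).
-- lines[idx:] with idx ≥ 0 (a Nat enumerate index) is List.drop idx.
def pvALoop (lines : List String) (idx : Nat) (rest : List String) (tl : List String) :
    List String × List String :=
  match rest with
  | [] => (tl, [])
  | line :: rs =>
      if tl.length < 2 ∧ PySem.Str.len line ≤ 80 ∧
         (PySem.Str.endswith line "." || PySem.Str.endswith line "!" || PySem.Str.endswith line "?") = false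
      then pvALoop lines (idx + 1) rs (tl ++ [line])
      else (tl, lines.drop idx)

def split_ceo_block_py (block : String) : String × List String × List String :=
  match ((PySem.Str.splitlines block).filter (fun l => PySem.Str.strip l != "")).map PySem.Str.strip with
  | [] => ("", [], [])
  | first :: restAll =>
      match (if PySem.Str.startswith first "**" && PySem.Str.endswith first "**"
             then restAll else first :: restAll) with
      | [] => ("", [], [])
      | name :: rest =>
          match pvALoop (name :: rest) 1 rest [] with
          | (tl, ml) => (name, tl, ml)

-- ===== PORT B =====
-- B's disqualification test: len(l) > 80 or l.endswith((".", "!", "?"))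
def pvFailB (l : String) : Bool :=
  decide (PySem.Str.len l > 80) ||
  (PySem.Str.endswith l "." || PySem.Str.endswith l "!" || PySem.Str.endswith l "?")

-- B's next((i for i, l in enumerate(rest) if fail(l)), len(rest)): the lazy generator
-- scans until the first disqualifying line and yields its index, default len(rest).
def pvFirstFail (rest : List String) : Nat :=
  match rest with
  | [] => 0
  | l :: ls => if pvFailB l then 0 else pvFirstFail ls + 1

def split_ceo_block_py_alt (block : String) : String × List String × List String :=
  match ((PySem.Str.splitlines block).filter (fun l => PySem.Str.strip l != "")).map PySem.Str.strip with
  | [] => ("", [], [])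
  | first :: restAll =>
      match (if PySem.Str.startswith first "**" && PySem.Str.endswith first "**"
             then restAll else first :: restAll) with
      | [] => ("", [], [])
      | name :: rest =>
          (name, rest.take (min 2 (pvFirstFail rest)), rest.drop (min 2 (pvFirstFail rest)))

-- ===== PRECONDITION & SPEC =====
def Spec_split_ceo_block_py (block : String) (out : String × List String × List String) : Prop := out = split_ceo_block_py_alt block
instance (block : String) (out : String × List String × List String) : Decidable (Spec_split_ceo_block_py block out) := by unfold Spec_split_ceo_block_py; infer_instance

-- ===== CLAIM (what is proved, stated in full; the proofs are below) =====
def Claim_equal_split_ceo_block_py : Prop := ∀ (block : String), Dom_split_ceo_block_py block → Spec_split_ceo_block_py block (split_ceo_block_py block)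

-- ===== LEMMAS AND PROOFS =====

-- reference cut length: number of lines A takes as titles, given c titles already taken
def pvCut (rs : List String) (c : Nat) : Nat :=
  match rs with
  | [] => 0
  | l :: ls => if c < 2 ∧ pvFailB l = false then pvCut ls (c + 1) + 1 else 0

theorem pvCond_iff (tl : List String) (l : String) :
    (tl.length < 2 ∧ PySem.Str.len l ≤ 80 ∧
     (PySem.Str.endswith l "." || PySem.Str.endswith l "!" || PySem.Str.endswith l "?") = false)
    ↔ (tl.length < 2 ∧ pvFailB l = false) := by
  simp only [pvFailB, Bool.or_eq_false_iff, decide_eq_false_iff_not]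
  constructor <;> rintro ⟨h1, h2, h3⟩ <;> exact ⟨h1, by omega, h3⟩

theorem pvALoop_eq (rs : List String) : ∀ (tl lines : List String) (idx : Nat),
    lines.drop idx = rs →
    pvALoop lines idx rs tl
      = (tl ++ rs.take (pvCut rs tl.length), rs.drop (pvCut rs tl.length)) := by
  induction rs with
  | nil => intro tl lines idx _; simp [pvALoop, pvCut]
  | cons l ls ih =>
      intro tl lines idx hdrop
      have hdrop' : lines.drop (idx + 1) = ls := by
        have := congrArg List.tail hdrop
        simpa [List.tail_drop] using this
      simp only [pvALoop, pvCut]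
      rw [if_congr (pvCond_iff tl l) rfl rfl]
      by_cases h : tl.length < 2 ∧ pvFailB l = false
      · rw [if_pos h, if_pos h, ih (tl ++ [l]) lines (idx + 1) hdrop']
        simp [List.take_succ_cons, List.drop_succ_cons]
      · rw [if_neg h, if_neg h]
        simp [hdrop]

-- A's accumulated title count equals B's clamped first-fail index
theorem pvCut_eq_min (rs : List String) : ∀ (c : Nat), pvCut rs c = min (2 - c) (pvFirstFail rs) := by
  induction rs with
  | nil => intro c; simp [pvCut, pvFirstFail]
  | cons l ls ih =>
      intro c
      simp only [pvCut, pvFirstFail]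
      by_cases hf : pvFailB l
      · simp [hf]
      · by_cases hc : c < 2
        · rw [if_pos ⟨hc, by simp [hf]⟩, if_neg hf, ih (c + 1)]; omega
        · rw [if_neg (by tauto), if_neg hf]; omega

theorem pvKey (name : String) (rest : List String) :
    pvALoop (name :: rest) 1 rest []
      = (rest.take (min 2 (pvFirstFail rest)), rest.drop (min 2 (pvFirstFail rest))) := by
  rw [pvALoop_eq rest [] (name :: rest) 1 (by simp)]
  simp [pvCut_eq_min]

-- ===== VERDICT (by name: the statement is the Claim_ definition above) =====
theorem split_ceo_block_py_spec : Claim_equal_split_ceo_block_py := by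
  intro block _
  unfold Spec_split_ceo_block_py split_ceo_block_py split_ceo_block_py_alt
  repeat' split
  all_goals simp_all [pvKey]
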